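-- pv_equiv track=rewrite | github.com/TechsNtheCity940/OliTunes | backend/music_theory.py | _get_scale_notes
-- ===== SOURCE A (Python) =====
-- from typing import List
--
-- def _get_scale_notes(tonic: str, mode: str) -> List[str]:
--     """Get the notes of a scale given the tonic and mode"""
--     # Intervals for major and minor scales (in semitones)
--     major_intervals = [0, 2, 4, 5, 7, 9, 11]
--     minor_intervals = [0, 2, 3, 5, 7, 8, 10]
--
--     # Select intervals based on mode
--     intervals = major_intervals if mode == 'major' else minor_intervals
--
--     # Map tonic name to MIDI note number for C0
--     tonic_names = ['C', 'C#', 'D', 'D#', 'E', 'F', 'F#', 'G', 'G#', 'A', 'A#', 'B']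
--     tonic_idx = tonic_names.index(tonic)
--
--     # Generate scale notes
--     scale = []
--     for interval in intervals:
--         note_idx = (tonic_idx + interval) % 12
--         scale.append(tonic_names[note_idx])
--
--     return scale
-- ===== SOURCE B (Python) =====
-- from typing import List
--
-- def _get_scale_notes(tonic: str, mode: str) -> List[str]:
--     """Get the notes of a scale given the tonic and mode (step-pattern version)."""
--     # Whole/half step pattern between consecutive scale degrees
--     steps = [2, 2, 1, 2, 2, 2] if mode == 'major' else [2, 1, 2, 2, 1, 2]
--     tonic_names = ['C', 'C#', 'D', 'D#', 'E', 'F', 'F#', 'G', 'G#', 'A', 'A#', 'B']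
--     position = tonic_names.index(tonic)
--     scale = [tonic_names[position % 12]]
--     for step in steps:
--         position += step
--         scale.append(tonic_names[position % 12])
--     return scale
-- ===== Notes on version B (the rewrite author's own statement) =====
-- stated objective: alternative
-- what changed: B builds the scale from a relative whole/half step pattern with a running position accumulator instead of mapping seven absolute semitone offsets from the tonic; Pre_ excludes tonics not among the 12 note names, where both programs raise ValueError from .index.
import Mathlib
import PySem

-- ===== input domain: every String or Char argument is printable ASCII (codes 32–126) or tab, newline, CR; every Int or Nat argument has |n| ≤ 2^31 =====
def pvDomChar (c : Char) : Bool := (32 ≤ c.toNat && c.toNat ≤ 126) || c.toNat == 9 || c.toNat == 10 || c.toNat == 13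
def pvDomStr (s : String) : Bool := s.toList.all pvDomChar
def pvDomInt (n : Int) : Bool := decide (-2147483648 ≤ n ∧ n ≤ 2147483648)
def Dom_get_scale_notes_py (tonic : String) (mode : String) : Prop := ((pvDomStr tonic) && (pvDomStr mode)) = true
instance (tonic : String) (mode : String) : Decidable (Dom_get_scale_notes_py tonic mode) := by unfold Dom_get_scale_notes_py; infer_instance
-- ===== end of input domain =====

-- B differs from A by decomposition only: relative step pattern with a running accumulator vs absolute offsets.

-- ===== PORT A =====
def pvTonicNames : List String := ["C", "C#", "D", "D#", "E", "F", "F#", "G", "G#", "A", "A#", "B"]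

def get_scale_notes_py (tonic : String) (mode : String) : List String :=
  let major_intervals : List Int := [0, 2, 4, 5, 7, 9, 11]
  let minor_intervals : List Int := [0, 2, 3, 5, 7, 8, 10]
  let intervals := if mode == "major" then major_intervals else minor_intervals
  match PySem.List.index? pvTonicNames tonic with
  | none => []  -- ValueError in Python; excluded by Pre_
  | some tonic_idx =>
      intervals.foldl (fun scale interval =>
        let note_idx := PySem.Int.mod ((tonic_idx : Int) + interval) 12
        scale ++ [PySem.List.pyGetD pvTonicNames note_idx ""]) []

-- ===== PORT B =====
def get_scale_notes_py_alt (tonic : String) (mode : String) : List String :=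
  let steps : List Int := if mode == "major" then [2, 2, 1, 2, 2, 2] else [2, 1, 2, 2, 1, 2]
  match PySem.List.index? pvTonicNames tonic with
  | none => []  -- ValueError in Python; excluded by Pre_
  | some p0 =>
      let init : Int × List String :=
        ((p0 : Int), [PySem.List.pyGetD pvTonicNames (PySem.Int.mod (p0 : Int) 12) ""])
      let fin := steps.foldl (fun (st : Int × List String) step =>
        let position := st.1 + step
        (position, st.2 ++ [PySem.List.pyGetD pvTonicNames (PySem.Int.mod position 12) ""])) init
      fin.2

-- ===== PRECONDITION & SPEC =====
-- Pre_ excludes tonics not among the 12 note names: there both A and B raise ValueError from list.index.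
def Pre_get_scale_notes_py (tonic : String) (mode : String) : Prop := tonic ∈ pvTonicNames
instance (tonic : String) (mode : String) : Decidable (Pre_get_scale_notes_py tonic mode) := by unfold Pre_get_scale_notes_py; infer_instance
def pvWitness_get_scale_notes_py : String × String := ("D", "minor")

def Spec_get_scale_notes_py (tonic : String) (mode : String) (out : List String) : Prop := out = get_scale_notes_py_alt tonic mode
instance (tonic : String) (mode : String) (out : List String) : Decidable (Spec_get_scale_notes_py tonic mode out) := by unfold Spec_get_scale_notes_py; infer_instance

-- ===== CLAIM (what is proved, stated in full; the proofs are below) =====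
def Claim_equal_get_scale_notes_py : Prop := ∀ (tonic : String) (mode : String), Dom_get_scale_notes_py tonic mode → Pre_get_scale_notes_py tonic mode → Spec_get_scale_notes_py tonic mode (get_scale_notes_py tonic mode)

-- ===== LEMMAS AND PROOFS =====
-- The ports depend on `mode` only through the Boolean `mode == "major"`; enumerate that and the 12 tonics.
lemma ports_agree_major : ∀ t ∈ pvTonicNames,
    get_scale_notes_py t "major" = get_scale_notes_py_alt t "major" := by decide

lemma ports_agree_other (mode : String) (h : (mode == "major") = false) :
    ∀ t ∈ pvTonicNames, get_scale_notes_py t mode = get_scale_notes_py_alt t mode := by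
  have key : ∀ t ∈ pvTonicNames,
      get_scale_notes_py t "minor" = get_scale_notes_py_alt t "minor" := by decide
  intro t ht
  have ha : get_scale_notes_py t mode = get_scale_notes_py t "minor" := by
    simp [get_scale_notes_py, h]
  have hb : get_scale_notes_py_alt t mode = get_scale_notes_py_alt t "minor" := by
    simp [get_scale_notes_py_alt, h]
  rw [ha, hb]; exact key t ht

-- ===== VERDICT (by name: the statement is the Claim_ definition above) =====
theorem get_scale_notes_py_spec : Claim_equal_get_scale_notes_py := by
  intro tonic mode _ hpre
  unfold Spec_get_scale_notes_py
  by_cases h : (mode == "major") = true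
  · have : mode = "major" := by simpa using h
    subst this
    exact ports_agree_major tonic hpre
  · exact ports_agree_other mode (by simpa using h) tonic hpre
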